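-- pv_equiv track=rewrite | github.com/DanniTheAsian/discrete-math | Logic/truthtable.py | extract_subexpressions
-- ===== SOURCE A (Python) =====
-- def extract_subexpressions(clean_expr: str) -> list[str]:
--     subs: list[str] = []
--     stack: list[int] = []
--
--     for i, ch in enumerate(clean_expr):
--         if ch == "(":
--             stack.append(i)
--         elif ch == ")" and stack:
--             start = stack.pop()
--             sub = clean_expr[start:i+1]
--             if sub not in subs:
--                 subs.append(sub)
--
--     if not subs:
--         subs.append(clean_expr)
--
--     if clean_expr not in subs:
--         subs.append(clean_expr)
--
--     return subs
-- ===== SOURCE B (Python) =====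
-- def extract_subexpressions(clean_expr: str) -> list[str]:
--     # Recursive-descent walk instead of an index stack: parse(i) scans inside an
--     # open '(' and returns the position of its matching ')' (or n if unclosed),
--     # emitting inner subexpressions first (post-order = closing-paren order).
--     subs: list[str] = []
--     n = len(clean_expr)
--
--     def add(s: str) -> None:
--         if s not in subs:
--             subs.append(s)
--
--     def parse(i: int) -> int:
--         while i < n:
--             ch = clean_expr[i]
--             if ch == '(':
--                 j = parse(i + 1)
--                 if j < n:
--                     add(clean_expr[i:j + 1])
--                 i = j + 1
--             elif ch == ')':
--                 return i
--             else:
--                 i += 1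
--         return i
--
--     i = 0
--     while i < n:
--         if clean_expr[i] == '(':
--             j = parse(i + 1)
--             if j < n:
--                 add(clean_expr[i:j + 1])
--             i = j + 1
--         else:
--             i += 1
--
--     if not subs:
--         subs.append(clean_expr)
--     add(clean_expr)
--     return subs
-- ===== Notes on version B (the rewrite author's own statement) =====
-- stated objective: alternative
-- what changed: Replaced the flat enumerate loop with an explicit index stack by a recursive-descent walk whose helper parse(i) returns the position of the matching ')', emitting inner subexpressions in post-order (closing-paren order) with no stack data structure.
import Mathlib
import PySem

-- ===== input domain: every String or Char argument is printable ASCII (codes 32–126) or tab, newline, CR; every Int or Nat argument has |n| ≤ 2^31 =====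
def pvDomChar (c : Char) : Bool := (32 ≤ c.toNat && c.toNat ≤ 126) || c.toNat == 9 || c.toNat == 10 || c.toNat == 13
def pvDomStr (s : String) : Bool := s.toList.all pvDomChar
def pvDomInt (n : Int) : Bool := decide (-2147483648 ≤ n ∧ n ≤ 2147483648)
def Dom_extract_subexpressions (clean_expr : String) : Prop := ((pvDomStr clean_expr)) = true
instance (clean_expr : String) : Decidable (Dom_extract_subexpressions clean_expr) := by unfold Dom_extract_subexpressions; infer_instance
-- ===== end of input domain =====

-- B replaces A's flat loop with an explicit index stack by a recursive-descent walk
-- (parse returns the matching ')' position, emitting subexpressions in post-order);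
-- same return value, different decomposition (objective: alternative).


-- ===== PORT A =====
-- the for-loop over enumerate(clean_expr): structural recursion over the chars with
-- the running index i; the Python list `stack` (append/pop at the end) is the Lean
-- list with its end at the head (push = cons, pop = head).
def pvLoopA (clean_expr : String) : List Char → Int → List String × List Int → List String × List Int
  | [], _, st => st
  | ch :: rest, i, (subs, stack) =>
      let st' :=
        if ch = '(' then (subs, i :: stack)
        else if ch = ')' then
          match stack with
          | start :: stack' =>
              let sub := PySem.Str.slice clean_expr (some start) (some (i + 1))
              ((if sub ∈ subs then subs else subs ++ [sub]), stack')
          | [] => (subs, stack)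
        else (subs, stack)
      pvLoopA clean_expr rest (i + 1) st'

def extract_subexpressions (clean_expr : String) : List String :=
  let subs := (pvLoopA clean_expr clean_expr.toList 0 ([], [])).1
  let subs := if subs = [] then subs ++ [clean_expr] else subs
  if clean_expr ∈ subs then subs else subs ++ [clean_expr]

-- ===== PORT B =====
def pvAdd (subs : List String) (s : String) : List String :=
  if s ∈ subs then subs else subs ++ [s]

-- parse(i): scan from i inside an open '('; return (position of the matching ')',
-- or length if unclosed, updated subs).  fuel bounds the call depth; length + 1 is
-- always enough (call arguments strictly increase, see pvParse_spec below).
def pvParse (clean_expr : String) (cs : List Char) : Nat → Nat → List String → Nat × List String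
  | 0, i, subs => (i, subs)
  | fuel + 1, i, subs =>
      if h : i < cs.length then
        if cs[i] = '(' then
          let (j, subs') := pvParse clean_expr cs fuel (i + 1) subs
          let subs'' := if j < cs.length then
              pvAdd subs' (PySem.Str.slice clean_expr (some (i : Int)) (some ((j : Int) + 1)))
            else subs'
          pvParse clean_expr cs fuel (j + 1) subs''
        else if cs[i] = ')' then (i, subs)
        else pvParse clean_expr cs fuel (i + 1) subs
      else (i, subs)

-- the top-level while loop: like parse but a stray ')' is skipped, not returned on
def pvTop (clean_expr : String) (cs : List Char) : Nat → Nat → List String → List String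
  | 0, _, subs => subs
  | fuel + 1, i, subs =>
      if h : i < cs.length then
        if cs[i] = '(' then
          let (j, subs') := pvParse clean_expr cs fuel (i + 1) subs
          let subs'' := if j < cs.length then
              pvAdd subs' (PySem.Str.slice clean_expr (some (i : Int)) (some ((j : Int) + 1)))
            else subs'
          pvTop clean_expr cs fuel (j + 1) subs''
        else pvTop clean_expr cs fuel (i + 1) subs
      else subs

def extract_subexpressions_alt (clean_expr : String) : List String :=
  let cs := clean_expr.toList
  let subs := pvTop clean_expr cs (cs.length + 1) 0 []
  let subs := if subs = [] then subs ++ [clean_expr] else subs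
  pvAdd subs clean_expr

-- ===== PRECONDITION & SPEC =====
def Spec_extract_subexpressions (clean_expr : String) (out : List String) : Prop := out = extract_subexpressions_alt clean_expr
instance (clean_expr : String) (out : List String) : Decidable (Spec_extract_subexpressions clean_expr out) := by unfold Spec_extract_subexpressions; infer_instance

-- ===== CLAIM (what is proved, stated in full; the proofs are below) =====
def Claim_equal_extract_subexpressions : Prop := ∀ (clean_expr : String), Dom_extract_subexpressions clean_expr → Spec_extract_subexpressions clean_expr (extract_subexpressions clean_expr)

-- ===== LEMMAS AND PROOFS =====

theorem pvParse_ge (s : String) (cs : List Char) (fuel i : Nat) (subs : List String)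
    (h : cs.length ≤ i) : pvParse s cs fuel i subs = (i, subs) := by
  cases fuel <;> simp [pvParse, Nat.not_lt.2 h]

theorem pvTop_ge (s : String) (cs : List Char) (fuel i : Nat) (subs : List String)
    (h : cs.length ≤ i) : pvTop s cs fuel i subs = subs := by
  cases fuel <;> simp [pvTop, Nat.not_lt.2 h]

theorem pvLoopA_nil (s : String) (i : Int) (st : List String × List Int) :
    pvLoopA s [] i st = st := by simp [pvLoopA]

-- one step of A's loop at a position i < n
theorem pvLoopA_step (s : String) (cs : List Char) (i : Nat) (h : i < cs.length)
    (st : List String × List Int) :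
    pvLoopA s (cs.drop i) (i : Int) st =
      pvLoopA s (cs.drop (i + 1)) ((i : Nat) + 1 : Nat)
        (if cs[i] = '(' then (st.1, (i : Int) :: st.2)
         else if cs[i] = ')' then
           match st.2 with
           | start :: stack' =>
               let sub := PySem.Str.slice s (some start) (some ((i : Int) + 1))
               ((if sub ∈ st.1 then st.1 else st.1 ++ [sub]), stack')
           | [] => st
         else st) := by
  rw [List.drop_eq_getElem_cons h]
  obtain ⟨subs, stack⟩ := st
  show pvLoopA s (cs[i] :: cs.drop (i+1)) (i : Int) (subs, stack) = _
  simp only [pvLoopA]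
  push_cast
  rfl

-- parse(i) characterises A's loop until the ')' that closes the top of the stack:
-- if parse finds it at j < n, A's loop from i with stack (k :: stack) equals A's loop
-- from j+1 with stack `stack` and the subexpression k..j+1 recorded; if parse runs to
-- the end, the subs component of A's final state is parse's subs.
theorem pvParse_spec (s : String) (cs : List Char) (fuel : Nat) :
    ∀ (i : Nat) (subs : List String), cs.length ≤ i + fuel →
    i ≤ (pvParse s cs fuel i subs).1 ∧
    ((pvParse s cs fuel i subs).1 < cs.length →
      ∀ (k : Nat) (stack : List Int),
        pvLoopA s (cs.drop i) i (subs, (k : Int) :: stack) =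
          pvLoopA s (cs.drop ((pvParse s cs fuel i subs).1 + 1)) ((pvParse s cs fuel i subs).1 + 1)
            (pvAdd (pvParse s cs fuel i subs).2
              (PySem.Str.slice s (some (k : Int)) (some (((pvParse s cs fuel i subs).1 : Int) + 1))), stack)) ∧
    (¬ (pvParse s cs fuel i subs).1 < cs.length →
      ∀ (k : Nat) (stack : List Int),
        (pvLoopA s (cs.drop i) i (subs, (k : Int) :: stack)).1 = (pvParse s cs fuel i subs).2) := by
  induction fuel with
  | zero =>
      intro i subs hfuel
      have hge : cs.length ≤ i := by omega
      simp only [pvParse]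
      refine ⟨le_refl _, fun hlt => absurd hlt (by omega), fun _ k stack => ?_⟩
      rw [List.drop_eq_nil_of_le hge, pvLoopA_nil]
  | succ fuel ih =>
      intro i subs hfuel
      by_cases hi : i < cs.length
      · by_cases hop : cs[i] = '('
        · -- '(' : inner parse, then continue
          rcases hP1 : pvParse s cs fuel (i + 1) subs with ⟨j1, s1⟩
          obtain ⟨hj1, ha1, hb1⟩ := ih (i + 1) subs (by omega)
          rw [hP1] at hj1 ha1 hb1
          dsimp only at hj1 ha1 hb1
          by_cases hj1n : j1 < cs.length
          · -- matched inner ')': continue from j1+1 with the sub recorded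
            have hP : pvParse s cs (fuel + 1) i subs =
                pvParse s cs fuel (j1 + 1)
                  (pvAdd s1 (PySem.Str.slice s (some (i : Int)) (some ((j1 : Int) + 1)))) := by
              simp [pvParse, hi, hop, hP1, hj1n]
            obtain ⟨hj2, ha2, hb2⟩ := ih (j1 + 1)
              (pvAdd s1 (PySem.Str.slice s (some (i : Int)) (some ((j1 : Int) + 1)))) (by omega)
            have hstep : ∀ (k : Nat) (stack : List Int),
                pvLoopA s (cs.drop i) i (subs, (k : Int) :: stack) =
                  pvLoopA s (cs.drop (j1 + 1)) ((j1 + 1 : Nat))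
                    (pvAdd s1 (PySem.Str.slice s (some (i : Int)) (some ((j1 : Int) + 1))),
                      (k : Int) :: stack) := by
              intro k stack
              rw [pvLoopA_step s cs i hi, if_pos hop]
              have := ha1 hj1n (i) ((k : Int) :: stack)
              simpa using this
            rw [hP]
            refine ⟨by omega, fun hlt k stack => ?_, fun hge k stack => ?_⟩
            · rw [hstep k stack]; exact ha2 hlt k stack
            · rw [hstep k stack]; exact hb2 hge k stack
          · -- inner parse ran to the end: everything is consumed
            have hP : pvParse s cs (fuel + 1) i subs = (j1 + 1, s1) := by
              simp [pvParse, hi, hop, hP1, hj1n, pvParse_ge s cs fuel (j1 + 1) s1 (by omega)]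
            rw [hP]
            refine ⟨by omega, fun hlt => absurd hlt (by omega), fun _ k stack => ?_⟩
            rw [pvLoopA_step s cs i hi, if_pos hop]
            have := hb1 hj1n i ((k : Int) :: stack)
            simpa using this
        · by_cases hcl : cs[i] = ')'
          · -- ')' : return this position
            have hP : pvParse s cs (fuel + 1) i subs = (i, subs) := by
              simp [pvParse, hi, hcl]
            rw [hP]
            refine ⟨le_refl _, fun _ k stack => ?_, fun hge => absurd hi hge⟩
            rw [pvLoopA_step s cs i hi, if_neg hop, if_pos hcl]
            simp [pvAdd]
          · -- ordinary character: skip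
            have hP : pvParse s cs (fuel + 1) i subs = pvParse s cs fuel (i + 1) subs := by
              simp [pvParse, hi, hop, hcl]
            rw [hP]
            obtain ⟨hj, ha, hb⟩ := ih (i + 1) subs (by omega)
            refine ⟨by omega, fun hlt k stack => ?_, fun hge k stack => ?_⟩
            · rw [pvLoopA_step s cs i hi, if_neg hop, if_neg hcl]
              exact ha hlt k stack
            · rw [pvLoopA_step s cs i hi, if_neg hop, if_neg hcl]
              exact hb hge k stack
      · have hge : cs.length ≤ i := by omega
        simp only [pvParse, dif_neg hi]
        refine ⟨le_refl _, fun hlt => absurd hlt (by omega), fun _ k stack => ?_⟩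
        rw [List.drop_eq_nil_of_le hge, pvLoopA_nil]

theorem pvTop_spec (s : String) (cs : List Char) (fuel : Nat) :
    ∀ (i : Nat) (subs : List String), cs.length ≤ i + fuel →
    (pvLoopA s (cs.drop i) i (subs, [])).1 = pvTop s cs fuel i subs := by
  induction fuel with
  | zero =>
      intro i subs hfuel
      rw [List.drop_eq_nil_of_le (by omega), pvLoopA_nil]
      simp [pvTop]
  | succ fuel ih =>
      intro i subs hfuel
      by_cases hi : i < cs.length
      · by_cases hop : cs[i] = '('
        · rcases hP1 : pvParse s cs fuel (i + 1) subs with ⟨j1, s1⟩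
          obtain ⟨hj1, ha1, hb1⟩ := pvParse_spec s cs fuel (i + 1) subs (by omega)
          rw [hP1] at hj1 ha1 hb1
          dsimp only at hj1 ha1 hb1
          rw [pvLoopA_step s cs i hi, if_pos hop]
          by_cases hj1n : j1 < cs.length
          · have hT : pvTop s cs (fuel + 1) i subs =
                pvTop s cs fuel (j1 + 1)
                  (pvAdd s1 (PySem.Str.slice s (some (i : Int)) (some ((j1 : Int) + 1)))) := by
              simp [pvTop, hi, hop, hP1, hj1n]
            rw [hT]
            have h1 := ha1 hj1n i ([] : List Int)
            have h1' : pvLoopA s (cs.drop (i + 1)) ((i + 1 : Nat)) (subs, [(i : Int)]) =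
                pvLoopA s (cs.drop (j1 + 1)) ((j1 + 1 : Nat))
                  (pvAdd s1 (PySem.Str.slice s (some (i : Int)) (some ((j1 : Int) + 1))), []) := by
              simpa using h1
            rw [h1']
            exact ih (j1 + 1) _ (by omega)
          · have hT : pvTop s cs (fuel + 1) i subs = s1 := by
              simp [pvTop, hi, hop, hP1, hj1n, pvTop_ge s cs fuel (j1 + 1) s1 (by omega)]
            rw [hT]
            have h1 := hb1 hj1n i ([] : List Int)
            simpa using h1
        · have hT : pvTop s cs (fuel + 1) i subs = pvTop s cs fuel (i + 1) subs := by
            simp [pvTop, hi, hop]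
          rw [hT, pvLoopA_step s cs i hi, if_neg hop]
          by_cases hcl : cs[i] = ')'
          · rw [if_pos hcl]; exact ih (i + 1) subs (by omega)
          · rw [if_neg hcl]; exact ih (i + 1) subs (by omega)
      · rw [List.drop_eq_nil_of_le (by omega), pvLoopA_nil, pvTop_ge s cs (fuel + 1) i subs (by omega)]

-- ===== VERDICT (by name: the statement is the Claim_ definition above) =====
theorem extract_subexpressions_spec : Claim_equal_extract_subexpressions := by
  intro clean_expr _
  unfold Spec_extract_subexpressions extract_subexpressions extract_subexpressions_alt
  have h := pvTop_spec clean_expr clean_expr.toList (clean_expr.toList.length + 1) 0 [] (by omega)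
  simp only [List.drop_zero, Nat.cast_zero] at h
  rw [h]
  simp [pvAdd]
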